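-- pv_equiv track=rewrite | github.com/gaiin-platform/amplify-genai-backend | amplify-lambda-admin/service/user_services.py | group_includes_user_groups
-- ===== SOURCE A (Python) =====
-- def group_includes_user_groups(group_name, user_direct_groups, all_groups, visited):
--     """
--     Check if a group includes any of the user's direct groups through its includeFromOtherGroups chain.
--     """
--     if group_name not in all_groups or group_name in visited:
--         return False
--
--     visited.add(group_name)
--     group_data = all_groups[group_name]
--
--     # Check if this group directly includes any of user's direct groups
--     includes = group_data.get("includeFromOtherGroups", [])
--     for included_group in includes:
--         if included_group in user_direct_groups:
--             return True
--         # Recursively check if included group eventually includes user's groups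
--         if group_includes_user_groups(included_group, user_direct_groups, all_groups, visited):
--             return True
--
--     return False
-- ===== SOURCE B (Python) =====
-- def group_includes_user_groups(group_name, user_direct_groups, all_groups, visited):
--     """
--     Iterative DFS with an explicit stack of (remaining includes) frames,
--     walking the include-chain in the same preorder as the recursive version.
--     Mutates `visited` like the original (adds every expanded group).
--     """
--     if group_name not in all_groups or group_name in visited:
--         return False
--     visited.add(group_name)
--     stack = [list(all_groups[group_name].get("includeFromOtherGroups", []))]
--     while stack:
--         frame = stack[-1]
--         if not frame:
--             stack.pop()
--             continue
--         inc = frame.pop(0)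
--         if inc in user_direct_groups:
--             return True
--         if inc in all_groups and inc not in visited:
--             visited.add(inc)
--             stack.append(list(all_groups[inc].get("includeFromOtherGroups", [])))
--     return False
-- ===== Notes on version B (the rewrite author's own statement) =====
-- stated objective: alternative
-- what changed: The recursive DFS over includeFromOtherGroups is replaced by an iterative DFS driven by an explicit stack of remaining-include frames, walking the include chain in the same preorder with the same visited-set pruning.
import Mathlib
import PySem

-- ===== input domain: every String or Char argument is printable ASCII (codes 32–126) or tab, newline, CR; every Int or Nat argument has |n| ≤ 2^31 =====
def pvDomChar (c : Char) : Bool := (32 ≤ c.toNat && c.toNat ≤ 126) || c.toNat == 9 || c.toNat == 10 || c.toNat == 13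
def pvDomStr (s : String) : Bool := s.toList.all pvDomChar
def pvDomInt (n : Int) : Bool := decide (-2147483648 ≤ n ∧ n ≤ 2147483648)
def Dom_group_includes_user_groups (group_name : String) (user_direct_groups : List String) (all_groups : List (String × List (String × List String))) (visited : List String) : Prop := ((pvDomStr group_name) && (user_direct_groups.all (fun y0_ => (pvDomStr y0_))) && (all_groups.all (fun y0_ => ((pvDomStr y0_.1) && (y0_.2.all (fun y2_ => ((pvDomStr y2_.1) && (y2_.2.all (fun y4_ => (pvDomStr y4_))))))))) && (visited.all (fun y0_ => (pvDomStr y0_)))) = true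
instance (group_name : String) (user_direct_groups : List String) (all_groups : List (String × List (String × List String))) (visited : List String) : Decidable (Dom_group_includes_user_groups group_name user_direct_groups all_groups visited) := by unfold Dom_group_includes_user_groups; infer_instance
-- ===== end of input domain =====

-- B replaces A's recursive DFS by an iterative DFS over an explicit stack of include-frames,
-- walking the include chain in the same preorder (objective: alternative decomposition).
-- The equivalence proved is about the RETURN value; A mutates `visited` in place in Python,
-- and B performs the same mutation in Python.

-- ===== PORT A =====
-- A's recursion is bounded in depth by the number of dict keys; the port carries fuel
-- `all_groups.length + 1` only to make the same computation total (the proofs below show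
-- this fuel is never exhausted).
mutual
  def pvAGo (udg : List String) (ag : PySem.Dict String (List (String × List String))) :
      Nat → String → List String → Bool × List String
    | 0, _, vis => (false, vis)
    | f + 1, name, vis =>
      if !(PySem.Dict.contains ag name) || vis.contains name then (false, vis)
      else
        pvALoop udg ag f
          (PySem.Dict.getD (PySem.Dict.mk ((PySem.Dict.get? ag name).getD []))
            "includeFromOtherGroups" [])
          (PySem.Set.add vis name)
  termination_by f _ _ => (f, 0)
  def pvALoop (udg : List String) (ag : PySem.Dict String (List (String × List String))) :
      Nat → List String → List String → Bool × List String
    | _, [], vis => (false, vis)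
    | f, g :: rest, vis =>
      if udg.contains g then (true, vis)
      else
        let p := pvAGo udg ag f g vis
        if p.1 then (true, p.2) else pvALoop udg ag f rest p.2
  termination_by f l _ => (f, l.length + 1)
end

def group_includes_user_groups (group_name : String) (user_direct_groups : List String) (all_groups : List (String × List (String × List String))) (visited : List String) : Bool :=
  (pvAGo user_direct_groups (PySem.Dict.mk all_groups) (all_groups.length + 1) group_name visited).1

-- ===== PORT B =====
def pvIncs (ag : PySem.Dict String (List (String × List String))) (g : String) : List String :=
  PySem.Dict.getD (PySem.Dict.mk ((PySem.Dict.get? ag g).getD [])) "includeFromOtherGroups" []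

-- B's while loop over the explicit stack of remaining-include frames; fuel counts pushes
-- (each push marks a fresh key visited), again only to make the same computation total.
def pvMach (udg : List String) (ag : PySem.Dict String (List (String × List String))) :
    Nat → List (List String) → List String → Bool
  | _, [], _ => false
  | f, [] :: stk, vis => pvMach udg ag f stk vis
  | f, (g :: fr) :: stk, vis =>
    if udg.contains g then true
    else if PySem.Dict.contains ag g && !(vis.contains g) then
      match f with
      | 0 => false
      | f' + 1 => pvMach udg ag f' (pvIncs ag g :: fr :: stk) (PySem.Set.add vis g)
    else pvMach udg ag f (fr :: stk) vis
termination_by f stk _ => (f, (stk.map (fun l => l.length + 1)).sum)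

def group_includes_user_groups_alt (group_name : String) (user_direct_groups : List String) (all_groups : List (String × List (String × List String))) (visited : List String) : Bool :=
  let ag := PySem.Dict.mk all_groups
  if !(PySem.Dict.contains ag group_name) || visited.contains group_name then false
  else
    pvMach user_direct_groups ag all_groups.length [pvIncs ag group_name]
      (PySem.Set.add visited group_name)

-- ===== PRECONDITION & SPEC =====
def Spec_group_includes_user_groups (group_name : String) (user_direct_groups : List String) (all_groups : List (String × List (String × List String))) (visited : List String) (out : Bool) : Prop := out = group_includes_user_groups_alt group_name user_direct_groups all_groups visited
instance (group_name : String) (user_direct_groups : List String) (all_groups : List (String × List (String × List String))) (visited : List String) (out : Bool) : Decidable (Spec_group_includes_user_groups group_name user_direct_groups all_groups visited out) := by unfold Spec_group_includes_user_groups; infer_instance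

-- ===== CLAIM (what is proved, stated in full; the proofs are below) =====
def Claim_equal_group_includes_user_groups : Prop := ∀ (group_name : String) (user_direct_groups : List String) (all_groups : List (String × List (String × List String))) (visited : List String), Dom_group_includes_user_groups group_name user_direct_groups all_groups visited → Spec_group_includes_user_groups group_name user_direct_groups all_groups visited (group_includes_user_groups group_name user_direct_groups all_groups visited)

-- ===== LEMMAS AND PROOFS =====

-- number of still-unvisited keys of `ag`: the quantity both fuels dominate
theorem pv_filter_len_mono {α : Type} (l : List α) (p q : α → Bool)
    (h : ∀ x, p x = true → q x = true) : (l.filter p).length ≤ (l.filter q).length := by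
  induction l with
  | nil => simp
  | cons a t ih =>
    by_cases hp : p a = true
    · simp [List.filter, hp, h a hp]; omega
    · simp only [List.filter, Bool.not_eq_true] at *
      rw [hp]
      cases hq : q a <;> simp <;> omega

theorem pv_filter_len_lt {α : Type} (l : List α) (g : α) (p p' : α → Bool)
    (hg : g ∈ l) (h : ∀ x, p' x = true → p x = true)
    (hpg : p g = true) (hp'g : p' g = false) :
    (l.filter p').length < (l.filter p).length := by
  induction l with
  | nil => simp at hg
  | cons a t ih =>
    rcases List.mem_cons.mp hg with rfl | hgt
    · simp only [List.filter, hpg, hp'g]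
      have := pv_filter_len_mono t p' p h
      simp; omega
    · have := ih hgt
      by_cases hp' : p' a = true
      · simp only [List.filter, hp', h a hp']
        simp; omega
      · simp only [List.filter, Bool.not_eq_true] at hp' ⊢
        rw [hp']
        cases hq : p a <;> simp <;> omega

theorem pv_sub_add (vis : List String) (g : String) : ∀ x, x ∈ vis → x ∈ PySem.Set.add vis g := by
  intro x hx
  simp only [PySem.Set.add]
  split <;> simp [hx]

def pvS (ag : PySem.Dict String (List (String × List String))) (vis : List String) : Nat :=
  ((PySem.Dict.keys ag).filter (fun k => !(vis.contains k))).length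

theorem pvS_mono (ag : PySem.Dict String (List (String × List String))) (vis vis' : List String)
    (h : ∀ x, x ∈ vis → x ∈ vis') : pvS ag vis' ≤ pvS ag vis := by
  apply pv_filter_len_mono
  intro x hx
  simp only [Bool.not_eq_true', ← Bool.not_eq_true] at *
  intro hc
  exact hx (List.contains_iff_mem.mpr (h x (List.contains_iff_mem.mp hc)))

theorem pvS_dec (ag : PySem.Dict String (List (String × List String))) (vis : List String)
    (g : String) (hk : PySem.Dict.contains ag g = true) (hv : vis.contains g = false) :
    pvS ag (PySem.Set.add vis g) < pvS ag vis := by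
  have hgk : g ∈ PySem.Dict.keys ag := by
    rw [PySem.Dict.contains_eq_decide_mem_keys] at hk
    exact of_decide_eq_true hk
  apply pv_filter_len_lt _ g _ _ hgk
  · intro x hx
    simp only [Bool.not_eq_true'] at *
    rw [← Bool.not_eq_true] at *
    intro hc
    exact hx (List.contains_iff_mem.mpr (pv_sub_add vis g x (List.contains_iff_mem.mp hc)))
  · simp only [Bool.not_eq_true']
    exact hv
  · have hm : g ∈ PySem.Set.add vis g := by
      simp only [PySem.Set.add]
      split
      · exact List.contains_iff_mem.mp (by assumption)
      · simp
    simp only [Bool.not_eq_false']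
    exact List.contains_iff_mem.mpr hm

mutual
  theorem pvAGo_sub (udg : List String) (ag : PySem.Dict String (List (String × List String)))
      (f : Nat) (n : String) (vis : List String) :
      ∀ x, x ∈ vis → x ∈ (pvAGo udg ag f n vis).2 := by
    intro x hx
    cases f with
    | zero => simpa [pvAGo] using hx
    | succ f =>
      rw [pvAGo]
      split
      · simpa using hx
      · exact pvALoop_sub udg ag f _ _ x (pv_sub_add vis n x hx)
  termination_by (f, 0)
  theorem pvALoop_sub (udg : List String) (ag : PySem.Dict String (List (String × List String)))
      (f : Nat) (l : List String) (vis : List String) :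
      ∀ x, x ∈ vis → x ∈ (pvALoop udg ag f l vis).2 := by
    intro x hx
    cases l with
    | nil => simpa [pvALoop] using hx
    | cons g rest =>
      rw [pvALoop]
      split
      · simpa using hx
      · simp only []
        split
        · simpa using pvAGo_sub udg ag f g vis x hx
        · exact pvALoop_sub udg ag f rest _ x (pvAGo_sub udg ag f g vis x hx)
  termination_by (f, l.length + 1)
end

theorem pvS_all (ag : PySem.Dict String (List (String × List String))) (vis : List String)
    (hS : pvS ag vis = 0) (n : String) (hk : PySem.Dict.contains ag n = true) :
    vis.contains n = true := by
  unfold pvS at hS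
  rw [List.length_eq_zero_iff, List.filter_eq_nil_iff] at hS
  have hgk : n ∈ PySem.Dict.keys ag := by
    rw [PySem.Dict.contains_eq_decide_mem_keys] at hk
    exact of_decide_eq_true hk
  have := hS n hgk
  simpa using this

theorem pvAGo_zeroS (udg : List String) (ag : PySem.Dict String (List (String × List String)))
    (vis : List String) (hS : pvS ag vis = 0) (f : Nat) (n : String) :
    pvAGo udg ag f n vis = (false, vis) := by
  cases f with
  | zero => rw [pvAGo]
  | succ f =>
    rw [pvAGo]
    split
    · rfl
    · rename_i h
      exfalso
      rw [Bool.or_eq_true, Bool.not_eq_true'] at h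
      push Not at h
      obtain ⟨h1, h2⟩ := h
      have h1' : PySem.Dict.contains ag n = true := by
        revert h1; cases PySem.Dict.contains ag n <;> simp
      exact h2 (pvS_all ag vis hS n h1')

mutual
  theorem pvAGo_stab (udg : List String) (ag : PySem.Dict String (List (String × List String)))
      (fa fb : Nat) (n : String) (vis : List String)
      (ha : pvS ag vis ≤ fa) (hb : pvS ag vis ≤ fb) :
      pvAGo udg ag fa n vis = pvAGo udg ag fb n vis := by
    cases fa with
    | zero =>
      have hS : pvS ag vis = 0 := Nat.le_zero.mp ha
      rw [pvAGo_zeroS udg ag vis hS, pvAGo_zeroS udg ag vis hS]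
    | succ fa =>
      cases fb with
      | zero =>
        have hS : pvS ag vis = 0 := Nat.le_zero.mp hb
        rw [pvAGo_zeroS udg ag vis hS, pvAGo_zeroS udg ag vis hS]
      | succ fb =>
        rw [pvAGo, pvAGo]
        split
        · rfl
        · rename_i h
          rw [Bool.or_eq_true, Bool.not_eq_true'] at h
          push Not at h
          obtain ⟨h1, h2⟩ := h
          have h1' : PySem.Dict.contains ag n = true := by
            revert h1; cases PySem.Dict.contains ag n <;> simp
          have h2' : vis.contains n = false := by
            revert h2; cases vis.contains n <;> simp
          have hdec := pvS_dec ag vis n h1' h2'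
          exact pvALoop_stab udg ag fa fb _ _ (by omega) (by omega)
  termination_by (fa, 0)
  theorem pvALoop_stab (udg : List String) (ag : PySem.Dict String (List (String × List String)))
      (fa fb : Nat) (l : List String) (vis : List String)
      (ha : pvS ag vis ≤ fa) (hb : pvS ag vis ≤ fb) :
      pvALoop udg ag fa l vis = pvALoop udg ag fb l vis := by
    cases l with
    | nil => rw [pvALoop, pvALoop]
    | cons g rest =>
      rw [pvALoop, pvALoop]
      split
      · rfl
      · simp only []
        have hgo := pvAGo_stab udg ag fa fb g vis ha hb
        rw [hgo]
        split
        · rfl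
        · have hsub := pvAGo_sub udg ag fb g vis
          have hle : pvS ag (pvAGo udg ag fb g vis).2 ≤ pvS ag vis := pvS_mono ag vis _ hsub
          exact pvALoop_stab udg ag fa fb rest _ (by omega) (by omega)
  termination_by (fa, l.length + 1)
end

theorem pvMach_nil (udg : List String) (ag : PySem.Dict String (List (String × List String)))
    (f : Nat) (vis : List String) : pvMach udg ag f [] vis = false := by
  rw [pvMach.eq_def]

theorem pvMach_pop (udg : List String) (ag : PySem.Dict String (List (String × List String)))
    (f : Nat) (stk : List (List String)) (vis : List String) :
    pvMach udg ag f ([] :: stk) vis = pvMach udg ag f stk vis := by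
  rw [pvMach.eq_def]

theorem pvMach_cons (udg : List String) (ag : PySem.Dict String (List (String × List String)))
    (f : Nat) (g : String) (fr : List String) (stk : List (List String)) (vis : List String) :
    pvMach udg ag f ((g :: fr) :: stk) vis =
      (if udg.contains g then true
       else if PySem.Dict.contains ag g && !(vis.contains g) then
         match f with
         | 0 => false
         | f' + 1 => pvMach udg ag f' (pvIncs ag g :: fr :: stk) (PySem.Set.add vis g)
       else pvMach udg ag f (fr :: stk) vis) := by
  rw [pvMach.eq_def]

theorem pvAGo_dead (udg : List String) (ag : PySem.Dict String (List (String × List String)))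
    (f : Nat) (g : String) (vis : List String)
    (h : (PySem.Dict.contains ag g && !(vis.contains g)) = false) :
    pvAGo udg ag f g vis = (false, vis) := by
  cases f with
  | zero => rw [pvAGo]
  | succ f =>
    rw [pvAGo]
    rw [Bool.and_eq_false_iff] at h
    split
    · rfl
    · rename_i hc
      exfalso
      rw [Bool.or_eq_true, Bool.not_eq_true'] at hc
      push Not at hc
      obtain ⟨h1, h2⟩ := hc
      rcases h with h | h
      · exact h1 h
      · revert h2 h; cases vis.contains g <;> simp

theorem pvMach_stab (udg : List String) (ag : PySem.Dict String (List (String × List String)))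
    (fa fb : Nat) (stk : List (List String)) (vis : List String)
    (ha : pvS ag vis ≤ fa) (hb : pvS ag vis ≤ fb) :
    pvMach udg ag fa stk vis = pvMach udg ag fb stk vis := by
  match stk with
  | [] => rw [pvMach_nil, pvMach_nil]
  | [] :: stk => rw [pvMach_pop, pvMach_pop]; exact pvMach_stab udg ag fa fb stk vis ha hb
  | (g :: fr) :: stk =>
    rw [pvMach_cons, pvMach_cons]
    split
    · rfl
    · split
      · rename_i hprod
        have hdec := pvS_dec ag vis g (by revert hprod; cases PySem.Dict.contains ag g <;> simp)
          (by revert hprod; cases vis.contains g <;> simp)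
        cases fa with
        | zero => omega
        | succ fa' =>
          cases fb with
          | zero => omega
          | succ fb' =>
            simp only []
            exact pvMach_stab udg ag fa' fb' _ _ (by omega) (by omega)
      · exact pvMach_stab udg ag fa fb (fr :: stk) vis ha hb
termination_by (fa, (stk.map (fun l => l.length + 1)).sum)

theorem pvMach_chain (udg : List String) (ag : PySem.Dict String (List (String × List String)))
    (f : Nat) (fr : List String) (stk : List (List String)) (vis : List String)
    (hf : pvS ag vis ≤ f) :
    pvMach udg ag f (fr :: stk) vis =
      (if (pvALoop udg ag f fr vis).1 then true
       else pvMach udg ag f stk (pvALoop udg ag f fr vis).2) := by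
  match fr with
  | [] => rw [pvMach_pop, pvALoop]; simp
  | g :: fr' =>
    rw [pvMach_cons, pvALoop]
    split
    · rfl
    · rename_i hudg
      simp only []
      split
      · -- this include is expandable: B pushes, A recurses
        rename_i hprod
        have hk : PySem.Dict.contains ag g = true := by revert hprod; cases PySem.Dict.contains ag g <;> simp
        have hv : vis.contains g = false := by revert hprod; cases vis.contains g <;> simp
        have hdec := pvS_dec ag vis g hk hv
        cases f with
        | zero => omega
        | succ f'' =>
          simp only []
          have hgo : pvAGo udg ag (f'' + 1) g vis =
              pvALoop udg ag f'' (pvIncs ag g) (PySem.Set.add vis g) := by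
            rw [pvAGo, if_neg]
            · rfl
            · simp only [hk, Bool.not_true, Bool.false_or]
              simp
              intro hm
              exact absurd (List.contains_iff_mem.mpr hm) (by rw [hv]; exact Bool.false_ne_true)
          rw [hgo]
          have hS' : pvS ag (PySem.Set.add vis g) ≤ f'' := by omega
          rw [pvMach_chain udg ag f'' (pvIncs ag g) (fr' :: stk) (PySem.Set.add vis g) hS']
          set p1 := pvALoop udg ag f'' (pvIncs ag g) (PySem.Set.add vis g) with hp1
          have hsubp1 : pvS ag p1.2 ≤ f'' := by
            have hmono := pvS_mono ag (PySem.Set.add vis g) p1.2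
              (by rw [hp1]; exact pvALoop_sub udg ag f'' _ _)
            omega
          cases hb1 : p1.1
          · simp only [Bool.false_eq_true]
            rw [pvMach_chain udg ag f'' fr' stk p1.2 hsubp1]
            have hstabL : pvALoop udg ag f'' fr' p1.2 = pvALoop udg ag (f'' + 1) fr' p1.2 :=
              pvALoop_stab udg ag f'' (f'' + 1) fr' p1.2 hsubp1 (by omega)
            rw [hstabL]
            set p2 := pvALoop udg ag (f'' + 1) fr' p1.2 with hp2
            cases hb2 : p2.1
            · have hsubp2 : pvS ag p2.2 ≤ f'' := by
                have := pvS_mono ag p1.2 p2.2 (by rw [hp2]; exact pvALoop_sub udg ag (f'' + 1) _ _)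
                omega
              simp [hb2]
              exact pvMach_stab udg ag f'' (f'' + 1) stk p2.2 hsubp2 (by omega)
            · simp [hb2]
          · simp
      · -- dead include: both skip it
        rename_i hdead
        have hgo : pvAGo udg ag f g vis = (false, vis) :=
          pvAGo_dead udg ag f g vis
            (by revert hdead; cases (PySem.Dict.contains ag g && !(vis.contains g)) <;> simp)
        rw [hgo]
        simp only [Bool.false_eq_true]
        exact pvMach_chain udg ag f fr' stk vis hf
termination_by (f, fr.length)

theorem pv_final (group_name : String) (user_direct_groups : List String)
    (all_groups : List (String × List (String × List String))) (visited : List String) :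
    group_includes_user_groups group_name user_direct_groups all_groups visited =
      group_includes_user_groups_alt group_name user_direct_groups all_groups visited := by
  unfold group_includes_user_groups group_includes_user_groups_alt
  simp only []
  set ag := PySem.Dict.mk all_groups with hag
  set L := all_groups.length with hL
  have hSle : pvS ag visited ≤ L := by
    unfold pvS
    calc ((PySem.Dict.keys ag).filter (fun k => !(visited.contains k))).length
        ≤ (PySem.Dict.keys ag).length := List.length_filter_le _ _
      _ = L := by rw [hag, hL]; simp [PySem.Dict.keys]
  rw [pvAGo]
  split
  · rfl
  · rename_i hc
    rw [Bool.or_eq_true, Bool.not_eq_true'] at hc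
    push Not at hc
    obtain ⟨h1, h2⟩ := hc
    have hk : PySem.Dict.contains ag group_name = true := by
      revert h1; cases PySem.Dict.contains ag group_name <;> simp
    have hv : visited.contains group_name = false := by
      revert h2; cases visited.contains group_name <;> simp
    have hdec := pvS_dec ag visited group_name hk hv
    have hS' : pvS ag (PySem.Set.add visited group_name) ≤ L := by omega
    rw [pvMach_chain user_direct_groups ag L (pvIncs ag group_name) []
      (PySem.Set.add visited group_name) hS']
    rw [pvMach_nil]
    show (pvALoop user_direct_groups ag L (pvIncs ag group_name) (PySem.Set.add visited group_name)).1 = _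
    cases (pvALoop user_direct_groups ag L (pvIncs ag group_name) (PySem.Set.add visited group_name)).1 <;> simp

-- ===== VERDICT (by name: the statement is the Claim_ definition above) =====
theorem group_includes_user_groups_spec : Claim_equal_group_includes_user_groups := by
  intro group_name user_direct_groups all_groups visited _
  unfold Spec_group_includes_user_groups
  exact pv_final group_name user_direct_groups all_groups visited
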